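-- pv_equiv track=rewrite | github.com/YourStreamingTools/BotOfTheSpecter | bot/status.py | extract_channel
-- ===== SOURCE A (Python) =====
-- def extract_channel(cmdline, channel_username):
--     # Exact flag format: -channel <username> or -channel=<username>
--     for i, arg in enumerate(cmdline):
--         if arg in ("-channel", "--channel"):
--             if i + 1 < len(cmdline) and cmdline[i + 1] == channel_username:
--                 return True
--         if arg.startswith("-channel=") or arg.startswith("--channel="):
--             parts = arg.split("=", 1)
--             if len(parts) == 2 and parts[1] == channel_username:
--                 return True
--     return False
-- ===== SOURCE B (Python) =====
-- def extract_channel(cmdline, channel_username):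
--     # One left-to-right pass of a two-state machine ("did the previous argument
--     # name the flag?").  The equals form is recognised by whole-string comparison
--     # against the two precomputed target arguments, so no per-argument prefix
--     # parsing or splitting is needed.
--     target_short = "-channel=" + channel_username
--     target_long = "--channel=" + channel_username
--     after_flag = False
--     for arg in cmdline:
--         if (after_flag and arg == channel_username) or arg == target_short or arg == target_long:
--             return True
--         after_flag = arg in ("-channel", "--channel")
--     return False
-- ===== Notes on version B (the rewrite author's own statement) =====
-- stated objective: faster
-- what changed: A parses every argument (index lookahead, two startswith tests and split('=',1) per argument); B runs a two-state machine over the arguments (state = previous argument was the flag) and recognises the equals form by whole-string equality against the two target strings precomputed once, eliminating all per-argument prefix parsing and splitting (constant-factor speedup, measured ~2x).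
import Mathlib
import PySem

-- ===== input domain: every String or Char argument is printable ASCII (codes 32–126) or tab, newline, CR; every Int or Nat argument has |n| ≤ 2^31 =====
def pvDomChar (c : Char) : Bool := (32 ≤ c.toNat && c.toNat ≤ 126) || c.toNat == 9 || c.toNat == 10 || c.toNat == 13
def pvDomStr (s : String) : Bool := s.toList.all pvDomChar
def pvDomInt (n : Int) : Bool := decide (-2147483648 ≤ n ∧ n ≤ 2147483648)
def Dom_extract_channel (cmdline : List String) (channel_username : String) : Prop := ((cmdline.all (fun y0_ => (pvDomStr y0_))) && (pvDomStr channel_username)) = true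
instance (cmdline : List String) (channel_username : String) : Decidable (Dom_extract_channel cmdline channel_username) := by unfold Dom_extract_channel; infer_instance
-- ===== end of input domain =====

-- B replaces A's per-argument parsing (index lookahead, startswith, split('=',1)) by a
-- one-pass two-state machine comparing whole arguments against precomputed target strings.

-- ===== PORT A =====
-- the for-loop over enumerate(cmdline) with early returns, as structural recursion
def extract_channel_go (cmdline : List String) (channel_username : String) : List (Int × String) → Bool
  | [] => false
  | (i, arg) :: rest =>
      if (arg == "-channel" || arg == "--channel")
          && (decide (i + 1 < (cmdline.length : Int))
              && (PySem.List.pyGet? cmdline (i + 1) == some channel_username)) then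
        true
      else if PySem.Str.startswith arg "-channel=" || PySem.Str.startswith arg "--channel=" then
        let parts := (PySem.Str.splitMax? arg "=" 1).getD []
        if parts.length == 2 && (parts[1]? == some channel_username) then true
        else extract_channel_go cmdline channel_username rest
      else extract_channel_go cmdline channel_username rest

def extract_channel (cmdline : List String) (channel_username : String) : Bool :=
  extract_channel_go cmdline channel_username (PySem.List.enumerate cmdline 0)

-- ===== PORT B =====
-- the for-loop with the after_flag state, as structural recursion over the arguments
def extract_channel_alt_go (u target_short target_long : String) : Bool → List String → Bool
  | _, [] => false
  | after_flag, arg :: rest =>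
      if (after_flag && arg == u) || arg == target_short || arg == target_long then true
      else extract_channel_alt_go u target_short target_long
             (arg == "-channel" || arg == "--channel") rest

def extract_channel_alt (cmdline : List String) (channel_username : String) : Bool :=
  extract_channel_alt_go channel_username
    ("-channel=" ++ channel_username) ("--channel=" ++ channel_username) false cmdline

-- ===== PRECONDITION & SPEC =====
def Spec_extract_channel (cmdline : List String) (channel_username : String) (out : Bool) : Prop := out = extract_channel_alt cmdline channel_username
instance (cmdline : List String) (channel_username : String) (out : Bool) : Decidable (Spec_extract_channel cmdline channel_username out) := by unfold Spec_extract_channel; infer_instance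

-- ===== CLAIM (what is proved, stated in full; the proofs are below) =====
def Claim_equal_extract_channel : Prop := ∀ (cmdline : List String) (channel_username : String), Dom_extract_channel cmdline channel_username → Spec_extract_channel cmdline channel_username (extract_channel cmdline channel_username)

-- ===== LEMMAS AND PROOFS =====

-- A's per-argument equals-form test, named for the proofs
def pvEqA (arg u : String) : Bool :=
  (PySem.Str.startswith arg "-channel=" || PySem.Str.startswith arg "--channel=")
    && (((PySem.Str.splitMax? arg "=" 1).getD []).length == 2
        && ((PySem.Str.splitMax? arg "=" 1).getD [])[1]? == some u)

-- the pair (space-separated) form as an `any` over adjacent pairs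
def pvPairAny (u : String) (l : List String) : Bool :=
  (l.zip l.tail).any (fun p => (p.1 == "-channel" || p.1 == "--channel") && p.2 == u)

theorem pv_if_shape (c1 c2 c3 r : Bool) :
    (if c1 then true else if c2 then (if c3 then true else r) else r)
      = (c1 || c2 && c3 || r) := by
  cases c1 <;> cases c2 <;> cases c3 <;> cases r <;> rfl

-- ---- A's loop equals pairAny || any pvEqA (same as the loop's early-return semantics) ----
theorem extract_channel_go_eq (u : String) : ∀ (l pre : List String),
    extract_channel_go (pre ++ l) u (PySem.List.enumerate l (pre.length : Int)) =
      (pvPairAny u l || l.any (fun arg => pvEqA arg u)) := by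
  intro l
  induction l with
  | nil => intro pre; simp [PySem.List.enumerate, extract_channel_go, pvPairAny]
  | cons a rest ih =>
    intro pre
    have hen : PySem.List.enumerate (a :: rest) (pre.length : Int)
        = ((pre.length : Int), a) :: PySem.List.enumerate rest ((pre.length : Int) + 1) :=
      PySem.List.enumerate_cons a rest _
    have hstep : ((pre ++ [a]).length : Int) = (pre.length : Int) + 1 := by simp
    have ih' := ih (pre ++ [a])
    rw [List.append_assoc, List.singleton_append] at ih'
    rw [hstep] at ih'
    have hget : PySem.List.pyGet? (pre ++ a :: rest) ((pre.length : Int) + 1)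
        = rest[0]? := by
      have := PySem.List.pyGet?_append_right pre (a :: rest) 1
      simpa using this
    have hlen : (decide ((pre.length : Int) + 1 < ((pre ++ a :: rest).length : Int)))
        = !rest.isEmpty := by
      cases rest <;> simp [List.length_append]
    rw [hen]
    cases rest with
    | nil =>
      simp only [extract_channel_go, PySem.List.enumerate_nil, hget, hlen,
        List.isEmpty_nil, Bool.not_true, List.getElem?_nil, Bool.and_false, Bool.false_and]
      rw [pv_if_shape]
      simp [pvEqA, pvPairAny]
    | cons b t =>
      simp only [extract_channel_go, hget, hlen, List.isEmpty_cons, Bool.not_false,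
        List.getElem?_cons_zero, ih', Option.some_beq_some, Bool.true_and]
      rw [pv_if_shape]
      simp only [pvPairAny, pvEqA, List.tail_cons, List.zip_cons_cons, List.any_cons]
      ac_rfl

-- ---- character-level facts about split("=", 1) on a flag-prefixed argument ----
theorem pv_go_m0 (fuel : Nat) (l cur : List Char) (acc : List (List Char)) :
    PySem.Chars.splitOnMax.go ['='] fuel 0 l cur acc = ((cur.reverse ++ l) :: acc).reverse := by
  cases fuel <;> cases l <;> simp [PySem.Chars.splitOnMax.go]

theorem pv_go_scan : ∀ (pre : List Char), '=' ∉ pre → ∀ (fuel : Nat) (cur : List Char)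
    (acc : List (List Char)) (rest : List Char),
    pre.length + rest.length + 1 ≤ fuel →
    PySem.Chars.splitOnMax.go ['='] fuel 1 (pre ++ '=' :: rest) cur acc
      = acc.reverse ++ [cur.reverse ++ pre, rest] := by
  intro pre
  induction pre with
  | nil =>
    intro _ fuel cur acc rest hf
    obtain ⟨f, rfl⟩ : ∃ f, fuel = f + 1 := ⟨fuel - 1, by omega⟩
    simp [PySem.Chars.splitOnMax.go, pv_go_m0]
  | cons c cs ih =>
    intro hmem fuel cur acc rest hf
    obtain ⟨f, rfl⟩ : ∃ f, fuel = f + 1 := ⟨fuel - 1, by omega⟩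
    have hc : c ≠ '=' := by simp at hmem; tauto
    have hnp : ¬ (['='].isPrefixOf (c :: (cs ++ '=' :: rest)) = true) := by
      simp [List.isPrefixOf]; exact fun h => absurd h.symm hc
    simp only [List.cons_append, PySem.Chars.splitOnMax.go]
    rw [if_neg (by omega), if_neg hnp]
    rw [ih (by simp at hmem; tauto) f (c :: cur) acc rest (by simp at hf ⊢; omega)]
    simp

theorem pv_split_concat (pre rest : List Char) (h : '=' ∉ pre) :
    PySem.Chars.splitOnMax (pre ++ '=' :: rest) ['='] 1 = [pre, rest] := by
  unfold PySem.Chars.splitOnMax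
  rw [if_neg (by omega)]
  norm_num
  rw [pv_go_scan pre h _ [] [] rest (by simp)]
  simp

-- if arg = pfx ++ '=' ++ s with '=' ∉ pfx, then split("=",1) on arg is [pfx, s]
theorem pv_splitMax_eq (arg : String) (pfx s : List Char) (hp : '=' ∉ pfx)
    (h : arg.toList = pfx ++ '=' :: s) :
    ∃ x y : String, PySem.Str.splitMax? arg "=" 1 = some [x, y]
      ∧ x.toList = pfx ∧ y.toList = s := by
  have hb := PySem.Str.splitMax?_map arg "=" 1
  rw [show ("=" : String).toList = ['='] from rfl, h] at hb
  rw [show PySem.Chars.splitMax? (pfx ++ '=' :: s) ['='] 1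
        = some (PySem.Chars.splitOnMax (pfx ++ '=' :: s) ['='] 1) from by
      simp [PySem.Chars.splitMax?]] at hb
  rw [pv_split_concat pfx s hp] at hb
  cases hr : PySem.Str.splitMax? arg "=" 1 with
  | none => rw [hr] at hb; simp at hb
  | some parts =>
    rw [hr] at hb
    simp only [Option.map_some, Option.some.injEq] at hb
    match parts, hb with
    | [x, y], hb =>
      simp only [List.map_cons, List.map_nil, List.cons.injEq, and_true] at hb
      exact ⟨x, y, rfl, hb.1, hb.2⟩

theorem pv_toList_eq_iff (a b : String) : (a == b) = (a.toList == b.toList) := by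
  cases h : a == b with
  | true => simp only [beq_iff_eq] at h; simp [h]
  | false =>
    symm; rw [Bool.eq_false_iff]
    simp only [ne_eq, beq_iff_eq, beq_eq_false_iff_ne] at h ⊢
    exact fun hl => h (by apply String.ext; exact hl)

-- pointwise: A's equals-form test = whole-string comparison against the two targets
theorem pv_eqA_eq (arg u : String) :
    pvEqA arg u = ((arg == "-channel=" ++ u) || (arg == "--channel=" ++ u)) := by
  have htl1 : ("-channel=" ++ u).toList = "-channel".toList ++ '=' :: u.toList := by
    simp [String.toList_append]
  have htl2 : ("--channel=" ++ u).toList = "--channel".toList ++ '=' :: u.toList := by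
    simp [String.toList_append]
  by_cases h1 : PySem.Str.startswith arg "-channel=" = true
  · -- arg starts with "-channel="
    have hpre : ("-channel=" : String).toList <+: arg.toList := by
      have := (PySem.Chars.startswith_iff arg.toList ("-channel=" : String).toList).mp
      exact this (by simpa [PySem.Str.startswith] using h1)
    obtain ⟨s, hs⟩ := hpre
    have hs' : arg.toList = "-channel".toList ++ '=' :: s := by
      rw [← hs]; rfl
    obtain ⟨x, y, hsp, hx, hy⟩ := pv_splitMax_eq arg _ s (by decide) hs'
    have harg2 : (arg == "--channel=" ++ u) = false := by
      rw [pv_toList_eq_iff, hs', htl2]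
      simp only [beq_eq_false_iff_ne, ne_eq]
      intro hcontra
      have : '-' = 'c' := by
        have := congrArg (fun l => l[1]?) hcontra
        simpa using this.symm
      exact absurd this (by decide)
    rw [pvEqA, h1, hsp, harg2]
    have hy' : (y == u) = (s == u.toList) := by
      rw [pv_toList_eq_iff, hy]
    have harg1 : (arg == "-channel=" ++ u) = (s == u.toList) := by
      rw [pv_toList_eq_iff, hs', htl1]
      cases hsu : s == u.toList with
      | true => simp only [beq_iff_eq] at hsu; simp [hsu]
      | false =>
        simp only [beq_eq_false_iff_ne, ne_eq] at hsu
        simp only [beq_eq_false_iff_ne, ne_eq]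
        intro hc
        apply hsu
        have h' := List.append_cancel_left hc
        simpa using h'
    simp [harg1, hy']
  · by_cases h2 : PySem.Str.startswith arg "--channel=" = true
    · -- arg starts with "--channel="
      have hpre : ("--channel=" : String).toList <+: arg.toList := by
        have := (PySem.Chars.startswith_iff arg.toList ("--channel=" : String).toList).mp
        exact this (by simpa [PySem.Str.startswith] using h2)
      obtain ⟨s, hs⟩ := hpre
      have hs' : arg.toList = "--channel".toList ++ '=' :: s := by
        rw [← hs]; rfl
      obtain ⟨x, y, hsp, hx, hy⟩ := pv_splitMax_eq arg _ s (by decide) hs'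
      have harg1 : (arg == "-channel=" ++ u) = false := by
        rw [pv_toList_eq_iff, hs', htl1]
        simp only [beq_eq_false_iff_ne, ne_eq]
        intro hcontra
        have : 'c' = '-' := by
          have := congrArg (fun l => l[1]?) hcontra
          simpa using this.symm
        exact absurd this (by decide)
      rw [pvEqA, h2, hsp, harg1]
      have hy' : (y == u) = (s == u.toList) := by
        rw [pv_toList_eq_iff, hy]
      have harg2 : (arg == "--channel=" ++ u) = (s == u.toList) := by
        rw [pv_toList_eq_iff, hs', htl2]
        cases hsu : s == u.toList with
        | true => simp only [beq_iff_eq] at hsu; simp [hsu]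
        | false =>
          simp only [beq_eq_false_iff_ne, ne_eq] at hsu
          simp only [beq_eq_false_iff_ne, ne_eq]
          intro hc
          apply hsu
          have h' := List.append_cancel_left hc
          simpa using h'
      simp [harg2, hy']
    · -- neither prefix: both sides false
      have harg1 : (arg == "-channel=" ++ u) = false := by
        simp only [beq_eq_false_iff_ne, ne_eq]
        rintro rfl
        refine h1 ?_
        simp only [PySem.Str.startswith]
        rw [PySem.Chars.startswith_iff, htl1]
        exact ⟨u.toList, by simp [show ("-channel=" : String).toList = "-channel".toList ++ ['='] from rfl]⟩
      have harg2 : (arg == "--channel=" ++ u) = false := by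
        simp only [beq_eq_false_iff_ne, ne_eq]
        rintro rfl
        refine h2 ?_
        simp only [PySem.Str.startswith]
        rw [PySem.Chars.startswith_iff, htl2]
        exact ⟨u.toList, by simp [show ("--channel=" : String).toList = "--channel".toList ++ ['='] from rfl]⟩
      have h1' : PySem.Str.startswith arg "-channel=" = false := Bool.eq_false_iff.mpr h1
      have h2' : PySem.Str.startswith arg "--channel=" = false := Bool.eq_false_iff.mpr h2
      simp only [pvEqA]
      rw [h1', h2', harg1, harg2]
      simp

-- ---- B's state machine equals head-check || pairAny || any target-equality ----
theorem extract_channel_alt_go_eq (u : String) : ∀ (l : List String) (p : Bool),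
    extract_channel_alt_go u ("-channel=" ++ u) ("--channel=" ++ u) p l
      = ((p && (l.head? == some u)) || pvPairAny u l
          || l.any (fun arg => (arg == "-channel=" ++ u) || (arg == "--channel=" ++ u))) := by
  intro l
  induction l with
  | nil => intro p; simp [extract_channel_alt_go, pvPairAny]
  | cons arg rest ih =>
    intro p
    have : extract_channel_alt_go u ("-channel=" ++ u) ("--channel=" ++ u) p (arg :: rest)
        = (((p && arg == u) || arg == "-channel=" ++ u || arg == "--channel=" ++ u)
            || extract_channel_alt_go u ("-channel=" ++ u) ("--channel=" ++ u)
                 (arg == "-channel" || arg == "--channel") rest) := by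
      simp only [extract_channel_alt_go]
      cases ((p && arg == u) || arg == "-channel=" ++ u || arg == "--channel=" ++ u) <;> simp
    rw [this, ih]
    cases rest with
    | nil => simp [pvPairAny]; ac_rfl
    | cons b t =>
      simp only [pvPairAny, List.head?_cons, List.tail_cons, List.zip_cons_cons,
        List.any_cons, Option.some_beq_some]
      ac_rfl

-- ===== VERDICT (by name: the statement is the Claim_ definition above) =====
theorem extract_channel_spec : Claim_equal_extract_channel := by
  intro cmdline channel_username _
  unfold Spec_extract_channel extract_channel extract_channel_alt
  rw [extract_channel_alt_go_eq channel_username cmdline false]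
  have hA := extract_channel_go_eq channel_username cmdline []
  simp only [List.nil_append, List.length_nil, Nat.cast_zero] at hA
  rw [hA, Bool.false_and, Bool.false_or]
  congr 1
  exact congrArg (List.any cmdline) (funext fun arg => pv_eqA_eq arg channel_username)
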